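-- pv_equiv track=rewrite | github.com/PhilipGSanova/CSA-0664-Design-and-Analysis-of-Algorithms | Assignment - 4/Destroy Sequential Targets.py | min_seed
-- ===== SOURCE A (Python) =====
-- def min_seed(nums, space):
--     nums.sort()
--     max_targets = 0
--     min_seed_value = nums[0]
--
--     for num in nums:
--         targets = 1
--         for i in range(1, len(nums)):
--             if nums[i] - num <= space * (i - 1):
--                 targets += 1
--         if targets > max_targets:
--             max_targets = targets
--             min_seed_value = num
--
--     return min_seed_value
-- ===== SOURCE B (Python) =====
-- def min_seed(nums, space):
--     # Note: like A, this sorts nums in place (same observable mutation).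
--     nums.sort()
--     thresholds = sorted(nums[i] - space * (i - 1) for i in range(1, len(nums)))
--     best_count = 0
--     best = nums[0]
--     j = 0
--     for num in nums:
--         while j < len(thresholds) and thresholds[j] <= num:
--             j += 1
--         if j + 1 > best_count:
--             best_count = j + 1
--             best = num
--     return best
-- ===== Notes on version B (the rewrite author's own statement) =====
-- stated objective: faster
-- what changed: B precomputes the thresholds nums[i]-space*(i-1) once, sorts them, and counts hits per seed with a single two-pointer sweep over the sorted nums, removing A's O(n) inner scan per element.
import Mathlib
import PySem

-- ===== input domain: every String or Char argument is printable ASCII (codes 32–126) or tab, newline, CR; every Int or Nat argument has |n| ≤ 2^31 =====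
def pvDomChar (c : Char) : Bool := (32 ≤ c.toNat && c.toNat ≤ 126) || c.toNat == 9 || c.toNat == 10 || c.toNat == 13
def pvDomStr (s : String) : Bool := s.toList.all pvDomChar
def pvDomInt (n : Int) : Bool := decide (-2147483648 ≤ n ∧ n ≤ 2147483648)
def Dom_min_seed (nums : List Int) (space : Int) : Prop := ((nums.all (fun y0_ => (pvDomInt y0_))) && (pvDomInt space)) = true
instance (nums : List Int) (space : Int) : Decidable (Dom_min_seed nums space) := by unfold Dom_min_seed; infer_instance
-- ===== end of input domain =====

-- B replaces A's quadratic inner scan by sorted thresholds consumed once by a two-pointer sweep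
-- (O(n log n) vs O(n^2)); like A, the Python B sorts `nums` in place (same observable mutation);
-- the equivalence proved here is about the return value.

-- ===== PORT A =====
def min_seed (nums : List Int) (space : Int) : Int :=
  let s := PySem.List.sorted nums (fun x => x) false
  let st := s.foldl (fun (st : Int × Int) num =>
      let targets := (PySem.List.pyRange 1 (s.length : Int) 1).foldl
        (fun t i => if PySem.List.pyGetD s i 0 - num ≤ space * (i - 1) then t + 1 else t) (1 : Int)
      if targets > st.1 then (targets, num) else st)
    ((0 : Int), PySem.List.pyGetD s 0 0)
  st.2

-- ===== PORT B =====
-- the `while j < len(thresholds) and thresholds[j] <= num: j += 1` loop of Source B,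
-- carrying the not-yet-consumed suffix of `thresholds` together with the counter j
def pvAdvance (ts : List Int) (num : Int) (j : Int) : List Int × Int :=
  match ts with
  | [] => ([], j)
  | t :: rest => if t ≤ num then pvAdvance rest num (j + 1) else (t :: rest, j)

def min_seed_alt (nums : List Int) (space : Int) : Int :=
  let s := PySem.List.sorted nums (fun x => x) false
  let thresholds := PySem.List.sorted
      ((PySem.List.pyRange 1 (s.length : Int) 1).map
        (fun i => PySem.List.pyGetD s i 0 - space * (i - 1))) (fun x => x) false
  let st := s.foldl (fun (st : Int × Int × List Int × Int) num =>
      let adv := pvAdvance st.2.2.1 num st.2.2.2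
      if adv.2 + 1 > st.1 then (adv.2 + 1, num, adv.1, adv.2) else (st.1, st.2.1, adv.1, adv.2))
    ((0 : Int), PySem.List.pyGetD s 0 0, thresholds, (0 : Int))
  st.2.1

-- ===== PRECONDITION & SPEC =====
-- A evaluates nums[0] and so raises IndexError on the empty list; Pre_ excludes exactly that.
def Pre_min_seed (nums : List Int) (space : Int) : Prop := nums ≠ []
instance (nums : List Int) (space : Int) : Decidable (Pre_min_seed nums space) := by
  unfold Pre_min_seed; infer_instance

def pvWitness_min_seed : List Int × Int := ([3, 7, 8, 1, 1, 5], 2)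

def Spec_min_seed (nums : List Int) (space : Int) (out : Int) : Prop := out = min_seed_alt nums space
instance (nums : List Int) (space : Int) (out : Int) : Decidable (Spec_min_seed nums space out) := by
  unfold Spec_min_seed; infer_instance

-- ===== CLAIM (what is proved, stated in full; the proofs are below) =====
def Claim_equal_min_seed : Prop := ∀ (nums : List Int) (space : Int), Dom_min_seed nums space → Pre_min_seed nums space → Spec_min_seed nums space (min_seed nums space)

-- ===== LEMMAS AND PROOFS =====

-- A's inner loop is init + (number of mapped elements satisfying the predicate)
theorem foldl_if_count (l : List Int) (f : Int → Int) (num : Int) (c : Int) :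
    l.foldl (fun t i => if f i ≤ num then t + 1 else t) c
      = c + ((l.map f).countP (fun t => decide (t ≤ num)) : Int) := by
  induction l generalizing c with
  | nil => simp
  | cons h tl ih =>
      simp only [List.foldl_cons, List.map_cons, List.countP_cons, ih]
      by_cases hc : f h ≤ num <;> simp [hc] <;> push_cast <;> ring

theorem countP_eq_length_takeWhile (num : Int) (l : List Int)
    (hs : l.Pairwise (· ≤ ·)) :
    l.countP (fun t => decide (t ≤ num)) = (l.takeWhile (fun t => decide (t ≤ num))).length := by
  induction l with
  | nil => rfl
  | cons a tl ih =>
      have hs' := (List.pairwise_cons.mp hs).2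
      have hall := (List.pairwise_cons.mp hs).1
      by_cases ha : a ≤ num
      · simp [List.countP_cons, List.takeWhile_cons, ha, ih hs']
      · have hz : tl.countP (fun t => decide (t ≤ num)) = 0 := by
          rw [List.countP_eq_zero]
          intro t ht
          simp only [decide_eq_true_eq]
          have := hall t ht
          omega
        simp [List.countP_cons, List.takeWhile_cons, ha, hz]

-- pvAdvance on a sorted suffix consumes exactly the ≤-prefix and counts it
theorem pvAdvance_spec (num : Int) (ts : List Int) (j : Int)
    (hs : ts.Pairwise (· ≤ ·)) :
    pvAdvance ts num j
      = (ts.dropWhile (fun t => decide (t ≤ num)),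
         j + (ts.countP (fun t => decide (t ≤ num)) : Int)) := by
  induction ts generalizing j with
  | nil => simp [pvAdvance]
  | cons a tl ih =>
      have hs' := (List.pairwise_cons.mp hs).2
      have hall := (List.pairwise_cons.mp hs).1
      by_cases ha : a ≤ num
      · rw [pvAdvance, if_pos ha, ih _ hs']
        simp only [List.dropWhile_cons, List.countP_cons, ha, decide_true, if_pos]
        congr 1
        push_cast
        ring
      · rw [pvAdvance, if_neg ha]
        have hz : tl.countP (fun t => decide (t ≤ num)) = 0 := by
          rw [List.countP_eq_zero]
          intro t ht
          simp only [decide_eq_true_eq]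
          have := hall t ht
          omega
        simp [List.dropWhile_cons, List.countP_cons, ha, hz]

-- the two folds agree, given the two-pointer invariant: `taken` is the consumed prefix of T
theorem loop_eq (T : List Int) (hT : T.Pairwise (· ≤ ·)) :
    ∀ (l : List Int), l.Pairwise (· ≤ ·) →
    ∀ (taken rem : List Int) (bc best : Int),
    T = taken ++ rem → (∀ t ∈ taken, ∀ y ∈ l, t ≤ y) →
    (l.foldl (fun (st : Int × Int × List Int × Int) num =>
        let adv := pvAdvance st.2.2.1 num st.2.2.2
        if adv.2 + 1 > st.1 then (adv.2 + 1, num, adv.1, adv.2) else (st.1, st.2.1, adv.1, adv.2))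
      (bc, best, rem, (taken.length : Int))).2.1
    = (l.foldl (fun (st : Int × Int) num =>
        if 1 + (T.countP (fun t => decide (t ≤ num)) : Int) > st.1
        then (1 + (T.countP (fun t => decide (t ≤ num)) : Int), num) else st)
      (bc, best)).2 := by
  intro l hl
  induction l with
  | nil => intro taken rem bc best hsplit htk; rfl
  | cons num tl ih =>
      intro taken rem bc best hsplit htk
      have hl' := (List.pairwise_cons.mp hl).2
      have hall := (List.pairwise_cons.mp hl).1
      have hrem : rem.Pairwise (· ≤ ·) := by
        have := hsplit ▸ hT
        exact (List.pairwise_append.mp this).2.1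
      have hadv := pvAdvance_spec num rem (taken.length : Int) hrem
      -- counts: consumed prefix all ≤ num, so it is fully counted
      have htaken : taken.countP (fun t => decide (t ≤ num)) = taken.length := by
        apply List.countP_eq_length.mpr
        intro t ht
        exact decide_eq_true (htk t ht num List.mem_cons_self)
      have hcount : (taken.length : Int) + (rem.countP (fun t => decide (t ≤ num)) : Int)
          = (T.countP (fun t => decide (t ≤ num)) : Int) := by
        rw [hsplit, List.countP_append, htaken]
        push_cast; ring
      -- new consumed prefix
      have hsplit' : T = (taken ++ rem.takeWhile (fun t => decide (t ≤ num)))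
          ++ rem.dropWhile (fun t => decide (t ≤ num)) := by
        rw [hsplit, List.append_assoc, List.takeWhile_append_dropWhile]
      have hlen' : ((taken ++ rem.takeWhile (fun t => decide (t ≤ num))).length : Int)
          = (taken.length : Int) + (rem.countP (fun t => decide (t ≤ num)) : Int) := by
        rw [List.length_append, countP_eq_length_takeWhile num rem hrem]
        push_cast; ring
      have htk' : ∀ t ∈ taken ++ rem.takeWhile (fun t => decide (t ≤ num)), ∀ y ∈ tl, t ≤ y := by
        intro t ht y hy
        rcases List.mem_append.mp ht with h1 | h2
        · exact htk t h1 y (List.mem_cons_of_mem _ hy)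
        · have htn : t ≤ num := by
            have := List.mem_takeWhile_imp h2
            simpa using this
          exact le_trans htn (hall y hy)
      simp only [List.foldl_cons, hadv, hcount]
      by_cases hgt : (T.countP (fun t => decide (t ≤ num)) : Int) + 1 > bc
      · rw [if_pos (by omega), if_pos (by omega)]
        have := ih hl' (taken ++ rem.takeWhile (fun t => decide (t ≤ num)))
          (rem.dropWhile (fun t => decide (t ≤ num)))
          ((T.countP (fun t => decide (t ≤ num)) : Int) + 1) num hsplit' htk'
        rw [hlen', hcount] at this
        rw [this]
        congr 2
        simp [Prod.ext_iff]
        omega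
      · rw [if_neg (by omega), if_neg (by omega)]
        have := ih hl' (taken ++ rem.takeWhile (fun t => decide (t ≤ num)))
          (rem.dropWhile (fun t => decide (t ≤ num))) bc best hsplit' htk'
        rw [hlen', hcount] at this
        exact this

-- ===== VERDICT (by name: the statement is the Claim_ definition above) =====
theorem min_seed_spec : Claim_equal_min_seed := by
  intro nums space _ _
  unfold Spec_min_seed min_seed min_seed_alt
  set s := PySem.List.sorted nums (fun x => x) false with hsdef
  have hs : s.Pairwise (· ≤ ·) := PySem.List.sorted_pairwise nums (fun x => x)
  set TA := (PySem.List.pyRange 1 (s.length : Int) 1).map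
      (fun i => PySem.List.pyGetD s i 0 - space * (i - 1)) with hTAdef
  set T := PySem.List.sorted TA (fun x => x) false with hTdef
  have hTs : T.Pairwise (· ≤ ·) := PySem.List.sorted_pairwise TA (fun x => x)
  have hperm : T.Perm TA := PySem.List.sorted_perm TA (fun x => x) false
  -- rewrite A's inner loop into the canonical count over T
  have hA : ∀ num : Int,
      (PySem.List.pyRange 1 (s.length : Int) 1).foldl
        (fun t i => if PySem.List.pyGetD s i 0 - num ≤ space * (i - 1) then t + 1 else t) (1 : Int)
      = 1 + (T.countP (fun t => decide (t ≤ num)) : Int) := by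
    intro num
    have h1 : (PySem.List.pyRange 1 (s.length : Int) 1).foldl
        (fun t i => if PySem.List.pyGetD s i 0 - num ≤ space * (i - 1) then t + 1 else t) (1 : Int)
      = (PySem.List.pyRange 1 (s.length : Int) 1).foldl
        (fun t i => if PySem.List.pyGetD s i 0 - space * (i - 1) ≤ num then t + 1 else t) (1 : Int) := by
      have hf : (fun (t i : Int) => if PySem.List.pyGetD s i 0 - num ≤ space * (i - 1) then t + 1 else t)
          = (fun (t i : Int) => if PySem.List.pyGetD s i 0 - space * (i - 1) ≤ num then t + 1 else t) := by
        funext t i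
        by_cases h : PySem.List.pyGetD s i 0 - space * (i - 1) ≤ num
        · rw [if_pos (by omega), if_pos h]
        · rw [if_neg (by omega), if_neg h]
      rw [hf]
    rw [h1, foldl_if_count, ← hTAdef, hperm.countP_eq]
  simp only [hA]
  have key := loop_eq T hTs s hs [] T 0 (PySem.List.pyGetD s 0 0) rfl (by simp)
  simpa using key.symm
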